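-- pv_equiv track=rewrite | github.com/thehalleyyoung/deppy | src/deppy/render/predicate_refine.py | z_array_correct
-- ===== SOURCE A (Python) =====
-- from typing import (
--     Any,
--     Callable,
--     Dict,
--     FrozenSet,
--     Iterator,
--     List,
--     Optional,
--     Sequence,
--     Set,
--     Tuple,
--     Union,
-- )
--
-- def z_array_correct(s: str, z: Sequence[int]) -> bool:
--     """Check Z-array: z[i] = length of longest substring starting at i
--     that matches a prefix of s."""
--     n = len(s)
--     if len(z) != n:
--         return False
--     if n > 0 and z[0] != n:
--         return False
--     for i in range(1, n):
--         # z[i] should be the length of the longest prefix match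
--         expected = 0
--         while i + expected < n and s[expected] == s[i + expected]:
--             expected += 1
--         if z[i] != expected:
--             return False
--     return True
-- ===== SOURCE B (Python) =====
-- def z_array_correct(s, z):
--     """Check Z-array by computing the reference Z-array once with the
--     Z-algorithm (l, r match window) and comparing it to z element-wise."""
--     n = len(s)
--     if len(z) != n:
--         return False
--     if n == 0:
--         return True
--     zs = [0] * n
--     zs[0] = n
--     l, r = 0, 0
--     for i in range(1, n):
--         k = min(zs[i - l], r - i) if i < r else 0
--         while i + k < n and s[k] == s[i + k]:
--             k += 1
--         zs[i] = k
--         if i + k > r: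
--             l, r = i, i + k
--     return list(z) == zs
-- ===== Notes on version B (the rewrite author's own statement) =====
-- stated objective: alternative
-- what changed: B computes the reference Z-array once with the Z-algorithm (maintaining the [l,r) match window and reusing earlier entries) and compares it to z element-wise, instead of A's per-index naive rescan with early return.
import Mathlib
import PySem

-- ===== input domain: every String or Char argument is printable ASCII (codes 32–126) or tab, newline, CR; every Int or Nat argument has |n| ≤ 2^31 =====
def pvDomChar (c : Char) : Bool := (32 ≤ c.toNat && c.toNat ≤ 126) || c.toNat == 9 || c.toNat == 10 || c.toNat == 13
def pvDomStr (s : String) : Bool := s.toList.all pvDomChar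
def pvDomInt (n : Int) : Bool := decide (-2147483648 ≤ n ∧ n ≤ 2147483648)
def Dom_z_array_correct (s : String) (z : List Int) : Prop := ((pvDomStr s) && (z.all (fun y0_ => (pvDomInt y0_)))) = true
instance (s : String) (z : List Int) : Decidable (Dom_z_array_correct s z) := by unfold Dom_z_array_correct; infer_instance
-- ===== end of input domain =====

-- B verifies the Z-array by computing the reference Z-array once with the Z-algorithm
-- (l,r match window) and comparing element-wise, instead of A's per-index naive rescan (objective: alternative).


-- ===== PORT A =====
-- A's inner while loop: 'while i + expected < n and s[expected] == s[i + expected]: expected += 1'.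
-- At every call site 0 ≤ e and 1 ≤ i with n = len(s), so both pyGet? are `some` and the
-- Option equality is exactly Python's character comparison.
-- fuel = an upper bound on the remaining iterations, only to make the recursion structural;
-- it is always sufficient at the call sites, so the loop stops exactly where Python's does.
def zacWhile (s : String) (n i : Int) : Int → Nat → Int
  | e, 0 => e
  | e, fuel + 1 =>
    if i + e < n then
      if PySem.Str.pyGet? s e = PySem.Str.pyGet? s (i + e) then
        zacWhile s n i (e + 1) fuel
      else e
    else e

-- A's 'for i in range(1, n)' loop with its early 'return False'.
def zacLoop (s : String) (n : Int) (z : List Int) : Int → Nat → Bool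
  | _, 0 => true
  | i, fuel + 1 =>
    if i < n then
      let expected := zacWhile s n i 0 (n - i).toNat
      if PySem.List.pyGet? z i = some expected then zacLoop s n z (i + 1) fuel
      else false
    else true

def z_array_correct (s : String) (z : List Int) : Bool :=
  let n := PySem.Str.len s
  if PySem.List.len z ≠ n then false
  else if 0 < n ∧ PySem.List.pyGet? z 0 ≠ some n then false
  else zacLoop s n z 1 (n - 1).toNat

-- ===== PORT B =====
-- B's inner while loop (same text as in Source B): extends the match length k.
def zaltWhile (s : String) (n i : Int) : Int → Nat → Int
  | k, 0 => k
  | k, fuel + 1 =>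
    if i + k < n then
      if PySem.Str.pyGet? s k = PySem.Str.pyGet? s (i + k) then
        zaltWhile s n i (k + 1) fuel
      else k
    else k

-- B's Z-algorithm main loop over i, carrying the array zs and the window (l, r).
-- zs[i - l] is read via pyGetD (in range at every call: 0 ≤ i - l < len zs);
-- the assignment zs[i] = k is pySetD (in range: 1 ≤ i < n = len zs).
def zaltLoop (s : String) (n : Int) : Int → List Int → Int → Int → Nat → List Int
  | _, zs, _, _, 0 => zs
  | i, zs, l, r, fuel + 1 =>
    if i < n then
      let k0 := if i < r then min (PySem.List.pyGetD zs (i - l) 0) (r - i) else 0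
      let k := zaltWhile s n i k0 (n - i).toNat
      let zs' := PySem.List.pySetD zs i k
      if i + k > r then zaltLoop s n (i + 1) zs' i (i + k) fuel
      else zaltLoop s n (i + 1) zs' l r fuel
    else zs

def z_array_correct_alt (s : String) (z : List Int) : Bool :=
  let n := PySem.Str.len s
  if PySem.List.len z ≠ n then false
  else if n = 0 then true
  else
    let zs0 := PySem.List.pySetD (List.replicate n.toNat (0 : Int)) 0 n
    let zs := zaltLoop s n 1 zs0 0 0 (n - 1).toNat
    z == zs

-- ===== PRECONDITION & SPEC =====
def Spec_z_array_correct (s : String) (z : List Int) (out : Bool) : Prop := out = z_array_correct_alt s z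
instance (s : String) (z : List Int) (out : Bool) : Decidable (Spec_z_array_correct s z out) := by unfold Spec_z_array_correct; infer_instance

-- ===== CLAIM (what is proved, stated in full; the proofs are below) =====
def Claim_equal_z_array_correct : Prop := ∀ (s : String) (z : List Int), Dom_z_array_correct s z → Spec_z_array_correct s z (z_array_correct s z)

-- ===== LEMMAS AND PROOFS =====

-- length of the longest common prefix of two character lists
def lcp : List Char → List Char → Nat
  | a :: as, b :: bs => if a = b then lcp as bs + 1 else 0
  | _, _ => 0

-- the true Z-value at position i
def zNaive (cs : List Char) (i : Nat) : Nat := lcp cs (cs.drop i)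

-- the true Z-array
def trueZ (cs : List Char) : List Int := (List.range cs.length).map (fun i => (zNaive cs i : Int))


theorem lcp_le_left : ∀ (a b : List Char), lcp a b ≤ a.length := by
  intro a
  induction a with
  | nil => intro b; cases b <;> simp [lcp]
  | cons x xs ih =>
    intro b
    cases b with
    | nil => simp [lcp]
    | cons y ys =>
      simp only [lcp, List.length_cons]
      split
      · exact Nat.succ_le_succ (ih ys)
      · omega

theorem lcp_le_right : ∀ (a b : List Char), lcp a b ≤ b.length := by
  intro a
  induction a with
  | nil => intro b; cases b <;> simp [lcp]
  | cons x xs ih =>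
    intro b
    cases b with
    | nil => simp [lcp]
    | cons y ys =>
      simp only [lcp, List.length_cons]
      split
      · exact Nat.succ_le_succ (ih ys)
      · omega

theorem lcp_get : ∀ (a b : List Char) (k : Nat), k < lcp a b → ∃ c, a[k]? = some c ∧ b[k]? = some c := by
  intro a
  induction a with
  | nil => intro b k h; cases b <;> simp [lcp] at h
  | cons x xs ih =>
    intro b k h
    cases b with
    | nil => simp [lcp] at h
    | cons y ys =>
      simp only [lcp] at h
      split at h
      · subst_vars
        cases k with
        | zero => exact ⟨y, by simp, by simp⟩
        | succ k' =>
          obtain ⟨c, hc1, hc2⟩ := ih ys k' (by omega)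
          exact ⟨c, by simpa using hc1, by simpa using hc2⟩
      · omega

theorem lcp_cons_self (x : Char) (as bs : List Char) : lcp (x :: as) (x :: bs) = lcp as bs + 1 := by
  simp [lcp]

theorem lcp_stop : ∀ (a b : List Char), lcp a b < a.length → lcp a b < b.length → a[lcp a b]? ≠ b[lcp a b]? := by
  intro a
  induction a with
  | nil => intro b h; simp at h
  | cons x xs ih =>
    intro b h1 h2
    cases b with
    | nil => simp at h2
    | cons y ys =>
      by_cases hxy : x = y
      · subst hxy
        rw [lcp_cons_self] at h1 h2 ⊢
        simp only [List.getElem?_cons_succ]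
        exact ih ys (by simpa using h1) (by simpa using h2)
      · have h0 : lcp (x :: xs) (y :: ys) = 0 := by simp [lcp, hxy]
        rw [h0]
        simp only [List.getElem?_cons_zero]
        intro hh
        exact hxy (by injection hh)

theorem le_lcp : ∀ (a b : List Char) (k : Nat), (∀ t, t < k → ∃ c, a[t]? = some c ∧ b[t]? = some c) → k ≤ lcp a b := by
  intro a
  induction a with
  | nil =>
    intro b k h
    cases k with
    | zero => omega
    | succ k' => obtain ⟨c, hc, _⟩ := h 0 (by omega); simp at hc
  | cons x xs ih =>
    intro b k h
    cases k with
    | zero => omega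
    | succ k' =>
      cases b with
      | nil => obtain ⟨c, _, hc⟩ := h 0 (by omega); simp at hc
      | cons y ys =>
        obtain ⟨c, hc1, hc2⟩ := h 0 (by omega)
        simp at hc1 hc2
        subst hc1 hc2
        rw [lcp_cons_self]
        have := ih ys k' (fun t ht => by
          obtain ⟨c, h1, h2⟩ := h (t+1) (by omega)
          exact ⟨c, by simpa using h1, by simpa using h2⟩)
        omega

theorem lcp_self (a : List Char) : lcp a a = a.length := by
  have h1 := lcp_le_left a a
  have h2 := le_lcp a a a.length (fun t ht => ⟨a[t], by simp [ht], by simp [ht]⟩)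
  omega

theorem zNaive_le (cs : List Char) (i : Nat) : zNaive cs i ≤ cs.length - i := by
  have := lcp_le_right cs (cs.drop i)
  simpa [zNaive] using this

theorem zNaive_zero (cs : List Char) : zNaive cs 0 = cs.length := by
  simp [zNaive, lcp_self]

theorem zNaive_get (cs : List Char) (i k : Nat) (h : k < zNaive cs i) :
    ∃ c, cs[k]? = some c ∧ cs[i + k]? = some c := by
  obtain ⟨c, h1, h2⟩ := lcp_get cs (cs.drop i) k h
  exact ⟨c, h1, by rwa [List.getElem?_drop] at h2⟩

theorem zNaive_stop (cs : List Char) (i : Nat) (h1 : 1 ≤ i) (h2 : i + zNaive cs i < cs.length) :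
    cs[zNaive cs i]? ≠ cs[i + zNaive cs i]? := by
  have hle := zNaive_le cs i
  have hstop := lcp_stop cs (cs.drop i) (by unfold zNaive at *; omega)
    (by unfold zNaive at *; simp only [List.length_drop]; omega)
  unfold zNaive at *
  rwa [List.getElem?_drop] at hstop

theorem le_zNaive (cs : List Char) (i k : Nat)
    (h : ∀ t, t < k → ∃ c, cs[t]? = some c ∧ cs[i + t]? = some c) : k ≤ zNaive cs i := by
  apply le_lcp
  intro t ht
  obtain ⟨c, h1, h2⟩ := h t ht
  exact ⟨c, h1, by rwa [List.getElem?_drop]⟩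

theorem trueZ_length (cs : List Char) : (trueZ cs).length = cs.length := by
  simp [trueZ]

theorem trueZ_get (cs : List Char) (j : Nat) (h : j < cs.length) :
    (trueZ cs)[j]? = some ((zNaive cs j : Nat) : Int) := by
  simp [trueZ, h]

-- PySem.Str indexing at a Nat index is plain list indexing
theorem strGet_nat (s : String) (k : Nat) : PySem.Str.pyGet? s (k : Int) = s.toList[k]? := by
  simp only [pysem]

theorem zacWhile_eq (s : String) (i e : Nat) (fuel : Nat) (h1 : 1 ≤ i)
    (he : e ≤ zNaive s.toList i) (hf : s.toList.length ≤ i + e + fuel) :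
    zacWhile s (s.toList.length : Int) (i : Int) (e : Int) fuel = ((zNaive s.toList i : Nat) : Int) := by
  induction fuel generalizing e with
  | zero =>
    have hZle := zNaive_le s.toList i
    have heq : e = zNaive s.toList i := by omega
    rw [zacWhile]
    exact_mod_cast heq
  | succ fuel ih =>
    have hZle := zNaive_le s.toList i
    rcases Nat.lt_or_eq_of_le he with hlt | heq
    · obtain ⟨c, hc1, hc2⟩ := zNaive_get s.toList i e hlt
      have hin : i + e < s.toList.length := by omega
      rw [zacWhile]
      rw [if_pos (by exact_mod_cast hin)]
      have hcast : (i : Int) + (e : Int) = ((i + e : Nat) : Int) := by push_cast; ring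
      rw [hcast, strGet_nat, strGet_nat, hc1, hc2, if_pos rfl]
      have hcast2 : (e : Int) + 1 = ((e + 1 : Nat) : Int) := by push_cast; ring
      rw [hcast2]
      exact ih (e + 1) (by omega) (by omega)
    · rw [zacWhile]
      by_cases hin : i + e < s.toList.length
      · have hne := zNaive_stop s.toList i h1 (by omega)
        rw [if_pos (by exact_mod_cast hin)]
        have hcast : (i : Int) + (e : Int) = ((i + e : Nat) : Int) := by push_cast; ring
        have hne' : s.toList[e]? ≠ s.toList[i + e]? := by rw [heq]; exact hne
        rw [hcast, strGet_nat, strGet_nat, if_neg hne']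
        exact_mod_cast heq
      · rw [if_neg (by exact_mod_cast hin)]
        exact_mod_cast heq

theorem zaltWhile_eq_zacWhile (s : String) (n i : Int) (k : Int) (fuel : Nat) :
    zaltWhile s n i k fuel = zacWhile s n i k fuel := by
  induction fuel generalizing k with
  | zero => rfl
  | succ fuel ih =>
    rw [zaltWhile, zacWhile]
    split_ifs with h1 h2
    · exact ih (k + 1)
    · rfl
    · rfl

theorem zacLoop_iff (s : String) (z : List Int) (i fuel : Nat) (h1 : 1 ≤ i)
    (hf : s.toList.length ≤ i + fuel) :
    zacLoop s (s.toList.length : Int) z (i : Int) fuel = true ↔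
      ∀ j, i ≤ j → j < s.toList.length → z[j]? = some ((zNaive s.toList j : Nat) : Int) := by
  induction fuel generalizing i with
  | zero =>
    rw [zacLoop]
    constructor
    · intro _ j hj1 hj2; omega
    · intro _; rfl
  | succ fuel ih =>
    by_cases hlt : i < s.toList.length
    · rw [zacLoop]
      rw [if_pos (by exact_mod_cast hlt)]
      have hw : zacWhile s (s.toList.length : Int) (i : Int) ((0 : Nat) : Int)
          (((s.toList.length : Int) - (i : Int)).toNat) = ((zNaive s.toList i : Nat) : Int) :=
        zacWhile_eq s i 0 _ h1 (Nat.zero_le _) (by omega)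
      simp only [Nat.cast_zero] at hw
      simp only [hw, PySem.List.pyGet?_natCast]
      by_cases hz : z[i]? = some ((zNaive s.toList i : Nat) : Int)
      · rw [if_pos hz]
        have hcast : (i : Int) + 1 = ((i + 1 : Nat) : Int) := by push_cast; ring
        rw [hcast, ih (i + 1) (by omega) (by omega)]
        constructor
        · intro h j hj1 hj2
          rcases Nat.eq_or_lt_of_le hj1 with hj | hj
          · subst hj; exact hz
          · exact h j (by omega) hj2
        · intro h j hj1 hj2
          exact h j (by omega) hj2
      · rw [if_neg hz]
        simp only [Bool.false_eq_true, false_iff]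
        intro h
        exact hz (h i le_rfl hlt)
    · rw [zacLoop]
      rw [if_neg (by exact_mod_cast hlt)]
      constructor
      · intro _ j hj1 hj2; omega
      · intro _; rfl

theorem eq_trueZ_iff (cs : List Char) (z : List Int) (hlen : z.length = cs.length) :
    z = trueZ cs ↔ ∀ j, j < cs.length → z[j]? = some ((zNaive cs j : Nat) : Int) := by
  constructor
  · intro h j hj
    rw [h]
    exact trueZ_get cs j hj
  · intro h
    apply List.ext_getElem?
    intro j
    by_cases hj : j < cs.length
    · rw [h j hj, trueZ_get cs j hj]
    · rw [List.getElem?_eq_none (by omega), List.getElem?_eq_none (by rw [trueZ_length]; omega)]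

theorem A_true_iff (s : String) (z : List Int) :
    z_array_correct s z = true ↔ z = trueZ s.toList := by
  simp only [z_array_correct, PySem.Str.len_eq, PySem.List.len_eq]
  by_cases hlen : z.length = s.toList.length
  · rw [if_neg (by exact_mod_cast (by omega : ¬ z.length ≠ s.toList.length))]
    by_cases hN : s.toList.length = 0
    · rw [if_neg (fun hc => by rw [hN] at hc; simp at hc)]
      have hf0 : ((s.toList.length : Int) - 1).toNat = 0 := by omega
      rw [hf0, zacLoop]
      have hz : z = [] := List.eq_nil_of_length_eq_zero (by omega)
      have ht : trueZ s.toList = [] := List.eq_nil_of_length_eq_zero (by rw [trueZ_length]; omega)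
      simp [hz, ht]
    · -- n > 0
      have hN1 : 1 ≤ s.toList.length := by omega
      rw [PySem.List.pyGet?_zero]
      by_cases hz0 : z[0]? = some ((s.toList.length : Nat) : Int)
      · rw [if_neg (fun hc => hc.2 hz0)]
        have h1c : (1 : Int) = ((1 : Nat) : Int) := by norm_num
        rw [h1c, zacLoop_iff s z 1 _ le_rfl (by omega), eq_trueZ_iff s.toList z hlen]
        constructor
        · intro h j hj
          cases j with
          | zero => rw [hz0, zNaive_zero]
          | succ j' => exact h (j' + 1) (by omega) hj
        · intro h j hj1 hj2
          exact h j hj2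
      · rw [if_pos ⟨by exact_mod_cast hN1, hz0⟩]
        simp only [Bool.false_eq_true, false_iff]
        intro hc
        apply hz0
        rw [hc, trueZ_get s.toList 0 (by omega), zNaive_zero]
  · rw [if_pos (by exact_mod_cast (by omega : ¬ (z.length : Int) = (s.toList.length : Int)))]
    simp only [Bool.false_eq_true, false_iff]
    intro hc
    apply hlen
    rw [hc, trueZ_length]

theorem zaltLoop_spec (s : String) (i : Nat) (zs : List Int) (l r : Int) (fuel : Nat)
    (h1 : 1 ≤ i) (hin : i ≤ s.toList.length)
    (hf : s.toList.length ≤ i + fuel)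
    (hlen : zs.length = s.toList.length)
    (hprev : ∀ j, j < i → zs[j]? = some ((zNaive s.toList j : Nat) : Int))
    (hl : 0 ≤ l)
    (hw : (i : Int) < r → 1 ≤ l ∧ l < (i : Int) ∧ r ≤ (s.toList.length : Int) ∧ r - l ≤ ((zNaive s.toList l.toNat : Nat) : Int)) :
    zaltLoop s (s.toList.length : Int) (i : Int) zs l r fuel = trueZ s.toList := by
  induction fuel generalizing i zs l r with
  | zero =>
    rw [zaltLoop]
    rw [eq_trueZ_iff s.toList zs hlen]
    intro j hj
    exact hprev j (by omega)
  | succ fuel ih =>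
    by_cases hlt : i < s.toList.length
    · rw [zaltLoop, if_pos (by exact_mod_cast hlt)]
      simp only []
      set K0 : Int := (if (i : Int) < r then min (PySem.List.pyGetD zs ((i : Int) - l) 0) (r - (i : Int)) else 0) with hK0
      -- K0 is a sound lower bound for the true Z-value at i
      have hk0 : 0 ≤ K0 ∧ K0.toNat ≤ zNaive s.toList i := by
        rw [hK0]
        by_cases hir : (i : Int) < r
        · obtain ⟨hl1, hl2, hl3, hl4⟩ := hw hir
          obtain ⟨L, rfl⟩ : ∃ L : Nat, l = (L : Int) := ⟨l.toNat, (Int.toNat_of_nonneg hl).symm⟩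
          obtain ⟨R, rfl⟩ : ∃ R : Nat, r = (R : Int) := ⟨r.toNat, (Int.toNat_of_nonneg (by omega)).symm⟩
          have hL1 : 1 ≤ L := by exact_mod_cast hl1
          have hLi : L < i := by exact_mod_cast hl2
          have hRN : R ≤ s.toList.length := by exact_mod_cast hl3
          have hRz : R - L ≤ zNaive s.toList L := by
            have : (R : Int) - (L : Int) ≤ ((zNaive s.toList L : Nat) : Int) := by
              simpa [Int.toNat_natCast] using hl4
            omega
          have hiR : i < R := by exact_mod_cast hir
          -- the window [L, R) repeats the prefix: characters at (i-L)+t and i+t agree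
          have hwin : ∀ t : Nat, i + t < R → ∃ c, s.toList[(i - L) + t]? = some c ∧ s.toList[i + t]? = some c := by
            intro t ht
            have hu : (i - L) + t < zNaive s.toList L := by omega
            obtain ⟨c, hc1, hc2⟩ := zNaive_get s.toList L ((i - L) + t) hu
            have : L + ((i - L) + t) = i + t := by omega
            rw [this] at hc2
            exact ⟨c, hc1, hc2⟩
          have hj : zs[i - L]? = some ((zNaive s.toList (i - L) : Nat) : Int) := hprev (i - L) (by omega)
          have hgd : PySem.List.pyGetD zs ((i : Int) - (L : Int)) 0 = ((zNaive s.toList (i - L) : Nat) : Int) := by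
            rw [PySem.List.pyGetD_of_nonneg _ _ (by omega)]
            have hcast : ((i : Int) - (L : Int)).toNat = i - L := by omega
            rw [hcast, List.getD_eq_getElem?_getD, hj]
            rfl
          rw [if_pos hir, hgd]
          constructor
          · have : (0 : Int) ≤ (R : Int) - (i : Int) := by omega
            positivity
          · have hmin : min (zNaive s.toList (i - L)) (R - i) ≤ zNaive s.toList i := by
              apply le_zNaive
              intro t ht
              obtain ⟨c, hc1, hc2⟩ := hwin t (by omega)
              obtain ⟨c', hc1', hc2'⟩ := zNaive_get s.toList (i - L) t (by omega)
              refine ⟨c', hc1', ?_⟩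
              rw [hc2'] at hc1
              injection hc1 with hcc
              rw [← hcc] at hc2
              exact hc2
            have : (min ((zNaive s.toList (i - L) : Nat) : Int) ((R : Int) - (i : Int))).toNat
                = min (zNaive s.toList (i - L)) (R - i) := by omega
            omega
        · rw [if_neg hir]
          exact ⟨le_rfl, by simp⟩
      -- hence the while loop computes the true Z-value
      have hk : zaltWhile s (s.toList.length : Int) (i : Int) K0 (((s.toList.length : Int) - (i : Int)).toNat)
          = ((zNaive s.toList i : Nat) : Int) := by
        rw [zaltWhile_eq_zacWhile]
        have h2 := zacWhile_eq s i K0.toNat (((s.toList.length : Int) - (i : Int)).toNat) h1 hk0.2 (by omega)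
        rwa [Int.toNat_of_nonneg hk0.1] at h2
      rw [hk]
      rw [PySem.List.pySetD_of_nonneg _ _ (by omega : (0:Int) ≤ (i : Int)), Int.toNat_natCast]
      have hlen2 : (zs.set i ((zNaive s.toList i : Nat) : Int)).length = s.toList.length := by
        simp [hlen]
      have hprev2 : ∀ j, j < i + 1 → (zs.set i ((zNaive s.toList i : Nat) : Int))[j]? = some ((zNaive s.toList j : Nat) : Int) := by
        intro j hjlt
        rw [List.getElem?_set]
        by_cases hji : i = j
        · subst hji
          rw [if_pos rfl, if_pos (by rw [hlen]; exact hlt)]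
        · simp only [if_neg hji]
          exact hprev j (by omega)
      have hc1 : (i : Int) + 1 = ((i + 1 : Nat) : Int) := by push_cast; ring
      have hZle := zNaive_le s.toList i
      split_ifs with hbr
      · rw [hc1]
        apply ih (i + 1) _ (i : Int) ((i : Int) + ((zNaive s.toList i : Nat) : Int)) (by omega) (by omega) (by omega) hlen2 hprev2 (by omega)
        intro _
        refine ⟨by exact_mod_cast h1, by omega, by omega, ?_⟩
        rw [Int.toNat_natCast]
        omega
      · rw [hc1]
        apply ih (i + 1) _ l r (by omega) (by omega) (by omega) hlen2 hprev2 hl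
        intro h2
        obtain ⟨g1, g2, g3, g4⟩ := hw (by omega)
        exact ⟨g1, by omega, g3, g4⟩
    · rw [zaltLoop, if_neg (by exact_mod_cast hlt)]
      rw [eq_trueZ_iff s.toList zs hlen]
      intro j hj
      exact hprev j (by omega)

theorem B_true_iff (s : String) (z : List Int) :
    z_array_correct_alt s z = true ↔ z = trueZ s.toList := by
  simp only [z_array_correct_alt, PySem.Str.len_eq, PySem.List.len_eq]
  by_cases hlen : z.length = s.toList.length
  · rw [if_neg (by exact_mod_cast (by omega : ¬ z.length ≠ s.toList.length))]
    by_cases hN : s.toList.length = 0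
    · rw [if_pos (by exact_mod_cast hN)]
      have hz : z = [] := List.eq_nil_of_length_eq_zero (by omega)
      have ht : trueZ s.toList = [] := List.eq_nil_of_length_eq_zero (by rw [trueZ_length]; omega)
      simp [hz, ht]
    · rw [if_neg (by exact_mod_cast hN)]
      have hN1 : 1 ≤ s.toList.length := by omega
      have hzs0 : PySem.List.pySetD (List.replicate ((s.toList.length : Int)).toNat (0 : Int)) 0 ((s.toList.length : Int))
          = (List.replicate s.toList.length (0 : Int)).set 0 (s.toList.length : Int) := by
        rw [PySem.List.pySetD_of_nonneg _ _ (by omega)]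
        simp
      rw [hzs0]
      have h1c : (1 : Int) = ((1 : Nat) : Int) := by norm_num
      rw [h1c, zaltLoop_spec s 1 _ 0 0 (((s.toList.length : Int) - ((1 : Nat) : Int)).toNat) le_rfl hN1 (by omega)
        (by simp)
        (by
          intro j hj
          have hj0 : j = 0 := by omega
          subst hj0
          rw [zNaive_zero, List.getElem?_set_self (by rw [List.length_replicate]; omega)])
        le_rfl
        (by intro hc; exact absurd hc (by exact_mod_cast (by omega : ¬ (1:Nat) < 0)))]
      rw [beq_iff_eq]
  · rw [if_pos (by exact_mod_cast (by omega : ¬ (z.length : Int) = (s.toList.length : Int)))]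
    simp only [Bool.false_eq_true, false_iff]
    intro hc
    apply hlen
    rw [hc, trueZ_length]

-- ===== VERDICT (by name: the statement is the Claim_ definition above) =====
theorem z_array_correct_spec : Claim_equal_z_array_correct := by
  intro s z _
  unfold Spec_z_array_correct
  rw [Bool.eq_iff_iff, A_true_iff, B_true_iff]
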